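-- pv_equiv track=rewrite | github.com/bgyehi/2025_IDM_Lab_Study | test_gurobi.py | compute_tardiness_from_sequence
-- ===== SOURCE A (Python) =====
-- def compute_tardiness_from_sequence(seq, P, d):
--     """seq: list of job indices (0-based). P, d: lists"""
--     time = 0
--     total_tard = 0
--     C = {}
--     for j in seq:
--         time += P[j]
--         C[j] = time
--         tard = max(0, C[j] - d[j])
--         total_tard += tard
--     return total_tard, C
-- ===== SOURCE B (Python) =====
-- def compute_tardiness_from_sequence(seq, P, d):
--     """seq: list of job indices (0-based). P, d: lists.
--     Back-to-front: start from the total processing load and walk the sequence in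
--     reverse, peeling each job's processing time off a suffix accumulator; the
--     (job, completion) pairs collected backwards are reversed into the dict."""
--     rem = sum(P[j] for j in seq)
--     total = 0
--     pairs = []
--     for j in reversed(seq):
--         pairs.append((j, rem))
--         total += max(0, rem - d[j])
--         rem -= P[j]
--     C = dict(reversed(pairs))
--     return total, C
-- ===== Notes on version B (the rewrite author's own statement) =====
-- stated objective: alternative
-- what changed: A walks the sequence forward accumulating a running clock, the dict and the tardiness in one fused loop; B walks it backwards: it starts from the total processing load, peels each job's time off a suffix accumulator while scoring tardiness, collects (job, completion) pairs back-to-front and reverses them into the dict.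
import Mathlib
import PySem

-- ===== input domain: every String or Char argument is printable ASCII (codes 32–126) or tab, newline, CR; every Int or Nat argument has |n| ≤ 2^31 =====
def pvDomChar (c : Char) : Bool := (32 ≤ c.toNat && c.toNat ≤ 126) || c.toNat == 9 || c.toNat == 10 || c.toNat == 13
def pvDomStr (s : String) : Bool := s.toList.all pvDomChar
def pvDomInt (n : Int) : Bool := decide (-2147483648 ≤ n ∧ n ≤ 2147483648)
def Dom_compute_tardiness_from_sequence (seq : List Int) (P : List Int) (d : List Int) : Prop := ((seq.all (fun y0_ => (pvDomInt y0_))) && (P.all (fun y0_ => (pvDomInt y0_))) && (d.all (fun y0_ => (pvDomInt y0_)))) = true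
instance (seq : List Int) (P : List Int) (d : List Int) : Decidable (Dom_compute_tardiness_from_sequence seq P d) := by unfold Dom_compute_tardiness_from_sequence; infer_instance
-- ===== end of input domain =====

-- B traverses the sequence BACKWARDS from the total processing load (suffix accumulator),
-- collecting (job, completion) pairs in reverse and reversing them into the dict;
-- alternative decomposition, same O(n) cost.

-- ===== PORT A =====
-- A's fused forward loop: state (time, total_tard, C); C[j] is read back from the dict as in the source.
def compute_tardiness_from_sequence (seq : List Int) (P : List Int) (d : List Int) : Int × (List (Int × Int)) :=
  let st := seq.foldl (fun (st : Int × Int × PySem.Dict Int Int) j =>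
    let time := st.1 + (PySem.List.pyGet? P j).getD 0
    let C := st.2.2.insert j time
    let tard := max 0 (C.getD j 0 - (PySem.List.pyGet? d j).getD 0)
    (time, st.2.1 + tard, C)) (0, 0, PySem.Dict.empty)
  (st.2.1, st.2.2.items)

-- ===== PORT B =====
-- rem = sum(P[j] for j in seq); loop over reversed(seq); dict(reversed(pairs)).
def compute_tardiness_from_sequence_alt (seq : List Int) (P : List Int) (d : List Int) : Int × (List (Int × Int)) :=
  let rem0 := (seq.map (fun j => (PySem.List.pyGet? P j).getD 0)).sum
  let st := seq.reverse.foldl (fun (st : Int × Int × List (Int × Int)) j =>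
      (st.1 - (PySem.List.pyGet? P j).getD 0,
       st.2.1 + max 0 (st.1 - (PySem.List.pyGet? d j).getD 0),
       st.2.2 ++ [(j, st.1)])) (rem0, 0, [])
  (st.2.1, (PySem.Dict.ofList st.2.2.reverse).items)

-- ===== PRECONDITION & SPEC =====
-- Pre_ excludes exactly the inputs on which A raises IndexError: some j in seq out of
-- Python's (negative-index-aware) range of P or d.
def Pre_compute_tardiness_from_sequence (seq : List Int) (P : List Int) (d : List Int) : Prop :=
  ∀ j ∈ seq, (-(P.length : Int) ≤ j ∧ j < P.length) ∧ (-(d.length : Int) ≤ j ∧ j < d.length)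
instance (seq : List Int) (P : List Int) (d : List Int) : Decidable (Pre_compute_tardiness_from_sequence seq P d) := by unfold Pre_compute_tardiness_from_sequence; infer_instance
def pvWitness_compute_tardiness_from_sequence : List Int × List Int × List Int := ([1, 0], [2, 3], [1, 10])

def Spec_compute_tardiness_from_sequence (seq : List Int) (P : List Int) (d : List Int) (out : Int × (List (Int × Int))) : Prop := out = compute_tardiness_from_sequence_alt seq P d
instance (seq : List Int) (P : List Int) (d : List Int) (out : Int × (List (Int × Int))) : Decidable (Spec_compute_tardiness_from_sequence seq P d out) := by unfold Spec_compute_tardiness_from_sequence; infer_instance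

-- ===== CLAIM (what is proved, stated in full; the proofs are below) =====
def Claim_equal_compute_tardiness_from_sequence : Prop := ∀ (seq : List Int) (P : List Int) (d : List Int), Dom_compute_tardiness_from_sequence seq P d → Pre_compute_tardiness_from_sequence seq P d → Spec_compute_tardiness_from_sequence seq P d (compute_tardiness_from_sequence seq P d)

-- ===== LEMMAS AND PROOFS =====

-- Completion times of seq starting from running time t0.
def pvTms (P : List Int) (t0 : Int) : List Int → List Int
  | [] => []
  | j :: r => (t0 + (PySem.List.pyGet? P j).getD 0) :: pvTms P (t0 + (PySem.List.pyGet? P j).getD 0) r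

-- A's fused loop, characterised over zip seq (completion times).
theorem pvFoldA_eq (P d : List Int) (seq : List Int) : ∀ (t0 tot0 : Int) (C0 : PySem.Dict Int Int),
    (seq.foldl (fun (st : Int × Int × PySem.Dict Int Int) j =>
       (st.1 + (PySem.List.pyGet? P j).getD 0,
        st.2.1 + max 0 (((st.2.2.insert j (st.1 + (PySem.List.pyGet? P j).getD 0)).getD j 0) - (PySem.List.pyGet? d j).getD 0),
        st.2.2.insert j (st.1 + (PySem.List.pyGet? P j).getD 0))) (t0, tot0, C0)).2
    = ((seq.zip (pvTms P t0 seq)).foldl (fun (s : Int) jt => s + max 0 (jt.2 - (PySem.List.pyGet? d jt.1).getD 0)) tot0,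
       (seq.zip (pvTms P t0 seq)).foldl (fun (c : PySem.Dict Int Int) jt => c.insert jt.1 jt.2) C0) := by
  induction seq with
  | nil => intro t0 tot0 C0; simp [pvTms]
  | cons j r ih =>
    intro t0 tot0 C0
    simp only [List.foldl_cons, pvTms, List.zip_cons_cons]
    rw [ih]
    simp [PySem.Dict.getD_insert_self]

-- B's backward loop with the suffix accumulator, characterised over the same zip, reversed.
theorem pvFoldB_eq (P d : List Int) (seq : List Int) : ∀ (t0 tot0 : Int) (acc : List (Int × Int)),
    seq.reverse.foldl (fun (st : Int × Int × List (Int × Int)) j =>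
      (st.1 - (PySem.List.pyGet? P j).getD 0,
       st.2.1 + max 0 (st.1 - (PySem.List.pyGet? d j).getD 0),
       st.2.2 ++ [(j, st.1)])) (t0 + (seq.map (fun j => (PySem.List.pyGet? P j).getD 0)).sum, tot0, acc)
    = (t0,
       tot0 + (((seq.zip (pvTms P t0 seq)).reverse).map (fun jt => max 0 (jt.2 - (PySem.List.pyGet? d jt.1).getD 0))).sum,
       acc ++ (seq.zip (pvTms P t0 seq)).reverse) := by
  induction seq with
  | nil => intro t0 tot0 acc; simp [pvTms]
  | cons j r ih =>
    intro t0 tot0 acc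
    simp only [List.reverse_cons, List.foldl_append, List.map_cons, List.sum_cons, pvTms,
               List.zip_cons_cons]
    rw [show t0 + ((PySem.List.pyGet? P j).getD 0 + (r.map (fun j => (PySem.List.pyGet? P j).getD 0)).sum)
          = (t0 + (PySem.List.pyGet? P j).getD 0) + (r.map (fun j => (PySem.List.pyGet? P j).getD 0)).sum from by ring]
    rw [ih (t0 + (PySem.List.pyGet? P j).getD 0) tot0 acc]
    simp only [List.foldl_cons, List.foldl_nil, List.map_append, List.sum_append, List.map_cons,
               List.map_nil, List.sum_cons, List.sum_nil, List.append_assoc]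
    simp only [Prod.mk.injEq]
    refine ⟨by ring, by ring, trivial⟩

-- ===== VERDICT (by name: the statement is the Claim_ definition above) =====
theorem compute_tardiness_from_sequence_spec : Claim_equal_compute_tardiness_from_sequence := by
  intro seq P d _ _
  unfold Spec_compute_tardiness_from_sequence compute_tardiness_from_sequence compute_tardiness_from_sequence_alt
  show ((seq.foldl (fun (st : Int × Int × PySem.Dict Int Int) j =>
       (st.1 + (PySem.List.pyGet? P j).getD 0,
        st.2.1 + max 0 (((st.2.2.insert j (st.1 + (PySem.List.pyGet? P j).getD 0)).getD j 0) - (PySem.List.pyGet? d j).getD 0),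
        st.2.2.insert j (st.1 + (PySem.List.pyGet? P j).getD 0))) (0, 0, PySem.Dict.empty)).2.1,
     (seq.foldl (fun (st : Int × Int × PySem.Dict Int Int) j =>
       (st.1 + (PySem.List.pyGet? P j).getD 0,
        st.2.1 + max 0 (((st.2.2.insert j (st.1 + (PySem.List.pyGet? P j).getD 0)).getD j 0) - (PySem.List.pyGet? d j).getD 0),
        st.2.2.insert j (st.1 + (PySem.List.pyGet? P j).getD 0))) (0, 0, PySem.Dict.empty)).2.2.items)
    = ((seq.reverse.foldl (fun (st : Int × Int × List (Int × Int)) j =>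
      (st.1 - (PySem.List.pyGet? P j).getD 0,
       st.2.1 + max 0 (st.1 - (PySem.List.pyGet? d j).getD 0),
       st.2.2 ++ [(j, st.1)])) ((seq.map (fun j => (PySem.List.pyGet? P j).getD 0)).sum, 0, [])).2.1,
      (PySem.Dict.ofList ((seq.reverse.foldl (fun (st : Int × Int × List (Int × Int)) j =>
      (st.1 - (PySem.List.pyGet? P j).getD 0,
       st.2.1 + max 0 (st.1 - (PySem.List.pyGet? d j).getD 0),
       st.2.2 ++ [(j, st.1)])) ((seq.map (fun j => (PySem.List.pyGet? P j).getD 0)).sum, 0, [])).2.2.reverse)).items)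
  have hsum : (seq.map (fun j => (PySem.List.pyGet? P j).getD 0)).sum
      = 0 + (seq.map (fun j => (PySem.List.pyGet? P j).getD 0)).sum := (zero_add _).symm
  rw [hsum, pvFoldB_eq]
  rw [pvFoldA_eq P d seq 0 0 PySem.Dict.empty]
  simp only [List.nil_append, List.reverse_reverse, zero_add]
  refine Prod.ext ?_ rfl
  simp only [PySem.List.foldl_add, List.map_reverse, List.sum_reverse, zero_add]
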